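-- pv_equiv track=rewrite | github.com/DGKwak/Programers | 붕대감기(Lv1).py | solution_01
-- ===== SOURCE A (Python) =====
-- def solution_01(bandage, health, attacks):
--     hp = health
--     start = 1
--     for i, j in attacks:
--         hp += ((i - start) // bandage[0]) * bandage[2] + (i - start) * bandage[1]
--         start = i + 1
--         if hp >= health:
--             hp = health
--         hp -= j
--         if hp <= 0:
--             return -1
--     return hp
-- ===== SOURCE B (Python) =====
-- def solution_01(bandage, health, attacks):
--     k, b, c = bandage[0], bandage[1], bandage[2]
--     # annotate each attack with the previous attack time (0 before the first)
--     pairs = []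
--     prev = 0
--     for i, j in attacks:
--         pairs.append((i, j, prev))
--         prev = i
--     # Compose, from the last attack backwards, each forward transition
--     # hp -> min(hp + heal, health) - j (return -1 if <= 0) into one summary:
--     #   None                     -> the suffix always returns -1
--     #   (A, Bc, T), Bc/T optional -> -1 if hp <= T else min(hp + A, Bc)
--     state = (0, None, None)
--     for i, j, p in reversed(pairs):
--         if state is None:
--             continue
--         heal = ((i - (p + 1)) // k) * c + (i - (p + 1)) * b
--         A, Bc, T = state
--         M = T if (T is not None and T > 0) else 0
--         if health - j <= M:
--             state = None
--         else:
--             A2 = heal - j + A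
--             B2 = health - j + A if Bc is None else min(health - j + A, Bc)
--             state = (A2, B2, M + j - heal)
--     if state is None:
--         return -1
--     A, Bc, T = state
--     if T is not None and health <= T:
--         return -1
--     return health + A if Bc is None else min(health + A, Bc)
-- ===== Notes on version B (the rewrite author's own statement) =====
-- stated objective: alternative
-- what changed: B runs backwards over the attacks, composing each attack's hp transition (heal, cap at health, subtract damage, die at <=0) into a single closed-form summary -- 'always -1' or 'hp -> -1 if hp <= T else min(hp + A, B)' -- and applies that composed function once to the starting health, instead of A's forward hp simulation; Pre_ excludes bandages with fewer than 3 elements or bandage[0]==0, on which A raises whenever attacks is non-empty (IndexError / ZeroDivisionError) and the division-free empty-attacks corner of bandage[0]==0 is excluded with it.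
-- outside the precondition, e.g. on solution_01([], 0, []): A returns 0, B raises IndexError; on solution_01([0, 1, 1], 10, []): A returns 10, B returns 10
import Mathlib
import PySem

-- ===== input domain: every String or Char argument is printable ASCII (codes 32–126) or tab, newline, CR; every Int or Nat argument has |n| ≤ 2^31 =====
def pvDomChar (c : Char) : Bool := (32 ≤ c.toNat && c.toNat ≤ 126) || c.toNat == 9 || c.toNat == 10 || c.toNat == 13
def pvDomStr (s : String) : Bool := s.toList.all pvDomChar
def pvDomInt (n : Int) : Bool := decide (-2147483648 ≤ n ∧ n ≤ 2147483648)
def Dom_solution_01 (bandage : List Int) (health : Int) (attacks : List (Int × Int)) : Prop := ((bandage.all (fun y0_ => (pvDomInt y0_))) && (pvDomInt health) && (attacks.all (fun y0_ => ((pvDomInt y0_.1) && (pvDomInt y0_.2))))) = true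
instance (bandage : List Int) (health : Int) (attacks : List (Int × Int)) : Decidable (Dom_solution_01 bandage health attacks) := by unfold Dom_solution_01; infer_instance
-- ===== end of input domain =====

-- B replaces A's forward hp simulation by a backward pass that composes each attack's
-- hp transition into one piecewise summary (always -1 / threshold + capped affine map)
-- and applies it once to the initial health; same O(n), 'alternative'.

-- ===== PORT A =====
def solutionA_go (bandage : List Int) (health : Int) : List (Int × Int) → Int → Int → Int
  | [], hp, _start => hp
  | (i, j) :: rest, hp, start =>
    let hp := hp + PySem.Int.floordiv (i - start) (PySem.List.pyGetD bandage 0 0) * PySem.List.pyGetD bandage 2 0 + (i - start) * PySem.List.pyGetD bandage 1 0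
    let start := i + 1
    let hp := if hp ≥ health then health else hp
    let hp := hp - j
    if hp ≤ 0 then -1 else solutionA_go bandage health rest hp start

def solution_01 (bandage : List Int) (health : Int) (attacks : List (Int × Int)) : Int :=
  solutionA_go bandage health attacks health 1

-- ===== PORT B =====
-- summary of a suffix of attacks, as a function of the hp it is entered with:
-- none = always returns -1; some (A, Bc, T) = -1 if hp ≤ T else min (hp + A) Bc
-- (Bc / T = none: no cap / never dies)
def stepS (k b c health : Int) (q : Int × Int × Int) (st : Option (Int × Option Int × Option Int)) :
    Option (Int × Option Int × Option Int) :=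
  match st with
  | none => none
  | some (A, Bc, T) =>
    let heal := PySem.Int.floordiv (q.1 - (q.2.2 + 1)) k * c + (q.1 - (q.2.2 + 1)) * b
    let M := match T with | some t => if t > 0 then t else 0 | none => 0
    if health - q.2.1 ≤ M then none
    else
      some (heal - q.2.1 + A,
        some (match Bc with
              | some b' => min (health - q.2.1 + A) b'
              | none => health - q.2.1 + A),
        some (M + q.2.1 - heal))

def applyS (health : Int) (st : Option (Int × Option Int × Option Int)) : Int :=
  match st with
  | none => -1
  | some (A, Bc, T) =>
    if (match T with | some t => decide (health ≤ t) | none => false) then -1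
    else match Bc with | some b' => min (health + A) b' | none => health + A

def solution_01_alt (bandage : List Int) (health : Int) (attacks : List (Int × Int)) : Int :=
  let k := PySem.List.pyGetD bandage 0 0
  let b := PySem.List.pyGetD bandage 1 0
  let c := PySem.List.pyGetD bandage 2 0
  -- pairs: each attack annotated with the previous attack time (0 before the first)
  let pairs := (attacks.foldl (fun (st : List (Int × Int × Int) × Int) p => (st.1 ++ [(p.1, p.2, st.2)], p.1)) ([], 0)).1
  let st := pairs.reverse.foldl (fun s q => stepS k b c health q s) (some (0, none, none))
  applyS health st

-- ===== PRECONDITION & SPEC =====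
-- Pre_ excludes malformed bandages — fewer than 3 elements or bandage[0] = 0 — on which A
-- raises (IndexError / ZeroDivisionError) whenever attacks is non-empty; with attacks empty A
-- returns health without touching bandage, while B reads bandage up front and raises there.
def Pre_solution_01 (bandage : List Int) (health : Int) (attacks : List (Int × Int)) : Prop :=
  3 ≤ bandage.length ∧ PySem.List.pyGetD bandage 0 0 ≠ 0
instance (bandage : List Int) (health : Int) (attacks : List (Int × Int)) : Decidable (Pre_solution_01 bandage health attacks) := by unfold Pre_solution_01; infer_instance

def pvWitness_solution_01 : List Int × Int × (List (Int × Int)) := ([5, 1, 5], 30, [(2, 10), (9, 15), (10, 5), (11, 5)])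

def Spec_solution_01 (bandage : List Int) (health : Int) (attacks : List (Int × Int)) (out : Int) : Prop := out = solution_01_alt bandage health attacks
instance (bandage : List Int) (health : Int) (attacks : List (Int × Int)) (out : Int) : Decidable (Spec_solution_01 bandage health attacks out) := by unfold Spec_solution_01; infer_instance

-- ===== CLAIM (what is proved, stated in full; the proofs are below) =====
def Claim_equal_solution_01 : Prop := ∀ (bandage : List Int) (health : Int) (attacks : List (Int × Int)), Dom_solution_01 bandage health attacks → Pre_solution_01 bandage health attacks → Spec_solution_01 bandage health attacks (solution_01 bandage health attacks)

-- ===== LEMMAS AND PROOFS =====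

-- proof-side recursive form of B's 'pairs' list
def annotate : Int → List (Int × Int) → List (Int × Int × Int)
  | _, [] => []
  | prev, (i, j) :: rest => (i, j, prev) :: annotate i rest

-- applyS with a general entry hp (the port applies it to health only)
def evalS (health x : Int) (st : Option (Int × Option Int × Option Int)) : Int :=
  match st with
  | none => -1
  | some (A, Bc, T) =>
    if (match T with | some t => decide (x ≤ t) | none => false) then -1
    else match Bc with | some b' => min (x + A) b' | none => x + A

lemma applyS_eq_evalS (health : Int) (st : Option (Int × Option Int × Option Int)) :
    applyS health st = evalS health health st := by
  cases st with
  | none => rfl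
  | some s => obtain ⟨A, Bc, T⟩ := s; rfl

lemma pairs_eq_annotate (attacks : List (Int × Int)) :
    ∀ (acc : List (Int × Int × Int)) (prev : Int),
      (attacks.foldl (fun (st : List (Int × Int × Int) × Int) p => (st.1 ++ [(p.1, p.2, st.2)], p.1)) (acc, prev)).1
        = acc ++ annotate prev attacks := by
  induction attacks with
  | nil => intro acc prev; simp [annotate]
  | cons p rest ih =>
    intro acc prev
    obtain ⟨i, j⟩ := p
    simp only [List.foldl_cons, annotate]
    rw [ih]
    simp

-- the backward-composed summary computes exactly A's forward simulation
lemma summary_correct (bandage : List Int) (health : Int) :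
    ∀ (attacks : List (Int × Int)) (prev x : Int),
      evalS health x (List.foldr
          (fun q s => stepS (PySem.List.pyGetD bandage 0 0) (PySem.List.pyGetD bandage 1 0) (PySem.List.pyGetD bandage 2 0) health q s)
          (some (0, none, none)) (annotate prev attacks))
        = solutionA_go bandage health attacks x (prev + 1) := by
  intro attacks
  induction attacks with
  | nil =>
    intro prev x
    simp [annotate, evalS, solutionA_go]
  | cons p rest ih =>
    intro prev x
    obtain ⟨i, j⟩ := p
    simp only [annotate, List.foldr_cons, solutionA_go]
    simp only [← ih i]
    cases hS : List.foldr
        (fun q s => stepS (PySem.List.pyGetD bandage 0 0) (PySem.List.pyGetD bandage 1 0) (PySem.List.pyGetD bandage 2 0) health q s)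
        (some (0, none, none)) (annotate i rest) with
    | none =>
      clear ih hS
      simp only [stepS, evalS]
      split_ifs <;> rfl
    | some s =>
      obtain ⟨A, Bc, T⟩ := s
      clear ih hS
      simp only [stepS, evalS]
      generalize PySem.Int.floordiv (i - (prev + 1)) (PySem.List.pyGetD bandage 0 0) * PySem.List.pyGetD bandage 2 0 = u
      generalize (i - (prev + 1)) * PySem.List.pyGetD bandage 1 0 = v
      cases Bc <;> cases T <;>
        · simp only [stepS]
          split_ifs <;> simp only [evalS, decide_eq_true_eq, min_def] <;>
            (try split_ifs) <;> (try simp_all only [decide_eq_true_eq, not_true, false_implies]) <;> first | omega | linarith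

-- ===== VERDICT (by name: the statement is the Claim_ definition above) =====
theorem solution_01_spec : Claim_equal_solution_01 := by
  intro bandage health attacks _hdom _hpre
  unfold Spec_solution_01 solution_01
  simp only [solution_01_alt]
  rw [pairs_eq_annotate attacks [] 0, List.nil_append, List.foldl_reverse,
    applyS_eq_evalS]
  simpa using (summary_correct bandage health attacks 0 health).symm
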